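-- pv_equiv track=rewrite | github.com/JaredLGillespie/OpenKattis | Python/checkmateinone.py | is_opponent_threatened
-- ===== SOURCE A (Python) =====
-- def is_opponent_threatened(K, R, k):
--     if K is not None:
--         for i in range(-1, 2):
--             for j in range(-1, 2):
--                 if (K[0] + i, K[1] + j) == k:
--                     return True
--
--     if R is not None:
--         if R[0] == k[0]:
--             if K[0] != R[0]:
--                 return True
--
--             if k[0] < R[0] and (K[0] < k[0] or K[0] > R[0]):
--                 return True
--
--             if k[0] > R[0] and (K[0] < R[0] or K[0] > k[0]):
--                 return True
--
--         if R[1] == k[1]: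
--             if K[1] != R[1]:
--                 return True
--
--             if k[1] < R[1] and (K[1] < k[1] or K[1] > R[1]):
--                 return True
--
--             if k[1] > R[1] and (K[1] < R[1] or K[1] > k[1]):
--                 return True
--     return False
-- ===== SOURCE B (Python) =====
-- def is_opponent_threatened(K, R, k):
--     king = K is not None and abs(K[0] - k[0]) <= 1 and abs(K[1] - k[1]) <= 1
--     rook = R is not None and ((R[0] == k[0] and K[0] != R[0]) or
--                               (R[1] == k[1] and K[1] != R[1]))
--     return king or rook
-- ===== Notes on version B (the rewrite author's own statement) =====
-- stated objective: simpler
-- what changed: Replaces the 3x3 double loop with a closed-form Chebyshev-distance check and collapses the rook branch's nested ifs (whose inner between-checks are dead code since k and R already share the coordinate) into one boolean expression; Pre_ excludes K=None with a rook sharing a coordinate with k, where both programs raise TypeError.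
import Mathlib
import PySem

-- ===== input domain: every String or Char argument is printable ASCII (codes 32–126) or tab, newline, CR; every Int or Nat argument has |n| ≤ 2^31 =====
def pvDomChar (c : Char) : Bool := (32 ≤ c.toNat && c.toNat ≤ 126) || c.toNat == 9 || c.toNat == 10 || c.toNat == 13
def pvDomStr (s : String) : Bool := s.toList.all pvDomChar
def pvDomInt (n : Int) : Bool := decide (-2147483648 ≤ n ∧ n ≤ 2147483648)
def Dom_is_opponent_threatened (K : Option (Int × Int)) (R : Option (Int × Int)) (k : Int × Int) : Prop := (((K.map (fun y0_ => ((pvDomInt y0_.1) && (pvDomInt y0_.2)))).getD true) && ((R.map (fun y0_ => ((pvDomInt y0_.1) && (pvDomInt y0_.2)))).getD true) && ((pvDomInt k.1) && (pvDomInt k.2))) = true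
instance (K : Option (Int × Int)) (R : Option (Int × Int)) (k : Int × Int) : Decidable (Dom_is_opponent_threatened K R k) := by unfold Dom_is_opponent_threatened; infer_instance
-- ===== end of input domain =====

-- B replaces the 3x3 neighbourhood loop by a closed-form Chebyshev check and the rook
-- branch's nested ifs by one boolean expression (objective: simpler).
-- When Python A dereferences K[0]/K[1] with K = None it raises TypeError (and B raises
-- there too); those inputs are outside Pre_.  Inside Pre_ both ports dereference K only
-- where Python does; 'K.getD (0,0)' is the placeholder for the (never-reached) deref
-- when K = none.

-- ===== PORT A =====
def is_opponent_threatened (K : Option (Int × Int)) (R : Option (Int × Int)) (k : Int × Int) : Bool :=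
  -- the 3x3 double loop with early return: any over range(-1,2) × range(-1,2)
  let kingHit : Bool :=
    match K with
    | some Kp =>
      (PySem.List.pyRange (-1) 2 1).any (fun i =>
        (PySem.List.pyRange (-1) 2 1).any (fun j =>
          (Kp.1 + i, Kp.2 + j) == k))
    | none => false
  if kingHit then true
  else
    match R with
    | none => false
    | some Rp =>
      let Kv := K.getD (0, 0)   -- K[0]/K[1]: only evaluated where Python evaluates them (Pre_)
      if Rp.1 == k.1 then
        if Kv.1 != Rp.1 then true
        else if k.1 < Rp.1 && (Kv.1 < k.1 || Kv.1 > Rp.1) then true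
        else if k.1 > Rp.1 && (Kv.1 < Rp.1 || Kv.1 > k.1) then true
        else if Rp.2 == k.2 then
          if Kv.2 != Rp.2 then true
          else if k.2 < Rp.2 && (Kv.2 < k.2 || Kv.2 > Rp.2) then true
          else if k.2 > Rp.2 && (Kv.2 < Rp.2 || Kv.2 > k.2) then true
          else false
        else false
      else if Rp.2 == k.2 then
        if Kv.2 != Rp.2 then true
        else if k.2 < Rp.2 && (Kv.2 < k.2 || Kv.2 > Rp.2) then true
        else if k.2 > Rp.2 && (Kv.2 < Rp.2 || Kv.2 > k.2) then true
        else false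
      else false

-- ===== PORT B =====
def is_opponent_threatened_alt (K : Option (Int × Int)) (R : Option (Int × Int)) (k : Int × Int) : Bool :=
  let king : Bool :=
    match K with
    | some Kp => decide ((Kp.1 - k.1).natAbs ≤ 1) && decide ((Kp.2 - k.2).natAbs ≤ 1)
    | none => false
  let rook : Bool :=
    match R with
    | none => false
    | some Rp =>
      let Kv := K.getD (0, 0)   -- K[0]/K[1]: only evaluated where Python evaluates them (Pre_)
      (Rp.1 == k.1 && Kv.1 != Rp.1) || (Rp.2 == k.2 && Kv.2 != Rp.2)
  king || rook

-- ===== PRECONDITION & SPEC =====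
-- Pre_ excludes exactly the inputs on which Python A raises TypeError (K is None while a
-- present rook shares a coordinate with k, so K[0] or K[1] is dereferenced).
def Pre_is_opponent_threatened (K : Option (Int × Int)) (R : Option (Int × Int)) (k : Int × Int) : Prop :=
  K = none → R.all (fun Rp => decide (Rp.1 ≠ k.1) && decide (Rp.2 ≠ k.2)) = true
instance (K : Option (Int × Int)) (R : Option (Int × Int)) (k : Int × Int) : Decidable (Pre_is_opponent_threatened K R k) := by unfold Pre_is_opponent_threatened; infer_instance

def pvWitness_is_opponent_threatened : (Option (Int × Int)) × (Option (Int × Int)) × (Int × Int) :=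
  (some (0, 0), some (3, 5), (3, 4))

def Spec_is_opponent_threatened (K : Option (Int × Int)) (R : Option (Int × Int)) (k : Int × Int) (out : Bool) : Prop := out = is_opponent_threatened_alt K R k
instance (K : Option (Int × Int)) (R : Option (Int × Int)) (k : Int × Int) (out : Bool) : Decidable (Spec_is_opponent_threatened K R k out) := by unfold Spec_is_opponent_threatened; infer_instance

-- ===== CLAIM (what is proved, stated in full; the proofs are below) =====
def Claim_equal_is_opponent_threatened : Prop := ∀ (K : Option (Int × Int)) (R : Option (Int × Int)) (k : Int × Int), Dom_is_opponent_threatened K R k → Pre_is_opponent_threatened K R k → Spec_is_opponent_threatened K R k (is_opponent_threatened K R k)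

-- ===== LEMMAS AND PROOFS =====
theorem pvRange_m1_2 : PySem.List.pyRange (-1) 2 1 = [-1, 0, 1] := by decide

-- the 3x3 neighbourhood scan of A equals B's Chebyshev check
theorem king_eq (Kx Ky kx ky : Int) :
    ((PySem.List.pyRange (-1) 2 1).any fun i =>
      (PySem.List.pyRange (-1) 2 1).any fun j => (Kx + i, Ky + j) == (kx, ky))
    = (decide ((Kx - kx).natAbs ≤ 1) && decide ((Ky - ky).natAbs ≤ 1)) := by
  rw [Bool.eq_iff_iff]
  simp [pvRange_m1_2, Prod.ext_iff]
  omega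

-- ===== VERDICT (by name: the statement is the Claim_ definition above) =====
theorem is_opponent_threatened_spec : Claim_equal_is_opponent_threatened := by
  intro K R k _ hpre
  unfold Spec_is_opponent_threatened is_opponent_threatened is_opponent_threatened_alt
  rcases k with ⟨kx, ky⟩
  rcases K with _ | ⟨Kx, Ky⟩
  · rcases R with _ | ⟨Rx, Ry⟩
    · simp
    · have h := hpre rfl
      simp only [Option.all_some, Bool.and_eq_true, decide_eq_true_eq] at h
      simp_all
  · rcases R with _ | ⟨Rx, Ry⟩
    · simp only [king_eq, Bool.or_false]
      split <;> simp_all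
    · simp only [Option.getD_some, king_eq]
      split <;> simp_all
      split_ifs <;> rw [Bool.eq_iff_iff] <;>
        simp only [Bool.or_eq_true, Bool.and_eq_true, Bool.not_eq_eq_eq_not, Bool.not_true,
          decide_eq_true_eq, decide_eq_false_iff_not, beq_iff_eq, bne_iff_ne] <;> omega
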